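-- pv_equiv track=rewrite | github.com/panpan/algorithms | divide_and_conquer_problems/p1.py | largest_compared
-- ===== SOURCE A (Python) =====
-- def largest_compared(A): # returns max value and all values compared to it
--     if len(A) < 2:
--         return A[0], []
--     m = len(A)//2
--     left, right = largest_compared(A[:m]), largest_compared(A[m:])
--     if left[0] > right[0]:
--         left[1].append(right[0])
--         return left
--     else:
--         right[1].append(left[0])
--         return right
-- ===== SOURCE B (Python) =====
-- def largest_compared(A):
--     if len(A) < 2:
--         return A[0], []
--     mx = max(A)
--     w = len(A) - 1 - A[::-1].index(mx)   # rightmost max wins every tie in A's tournament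
--     lo, hi = 0, len(A)
--     comps = []
--     while hi - lo >= 2:
--         m = lo + (hi - lo) // 2
--         if w >= m:
--             comps.append(max(A[lo:m]))
--             lo = m
--         else:
--             comps.append(max(A[m:hi]))
--             hi = m
--     return mx, comps[::-1]
-- ===== Notes on version B (the rewrite author's own statement) =====
-- stated objective: faster
-- what changed: Instead of A's divide-and-conquer that recurses into both halves and merges, B locates the tournament winner directly (rightmost maximum), then walks only the winner's root-to-leaf path through the same len//2 splits, recording max(other half) at each split and reversing the list.
import Mathlib
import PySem

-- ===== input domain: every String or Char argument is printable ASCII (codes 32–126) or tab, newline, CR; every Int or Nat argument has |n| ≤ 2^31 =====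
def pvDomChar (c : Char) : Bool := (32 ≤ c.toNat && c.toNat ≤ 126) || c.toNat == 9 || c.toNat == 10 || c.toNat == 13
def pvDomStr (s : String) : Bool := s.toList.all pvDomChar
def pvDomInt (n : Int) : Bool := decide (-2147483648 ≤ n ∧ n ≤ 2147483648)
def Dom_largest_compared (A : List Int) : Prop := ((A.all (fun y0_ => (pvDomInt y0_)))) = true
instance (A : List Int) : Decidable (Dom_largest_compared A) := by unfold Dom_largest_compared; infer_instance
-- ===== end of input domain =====

-- B replaces A's two-sided divide-and-conquer by finding the tournament winner directly
-- (rightmost maximum) and walking only the winner's comparison path, collecting the max of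
-- the opposite half at each split; return values proved equal on nonempty lists.

-- ===== PORT A =====
-- literal port of A: recursion on the two slices A[:m], A[m:]; list .append = ++ [·]
def largest_compared (A : List Int) : Int × List Int :=
  if _h : A.length < 2 then
    ((PySem.List.pyGet? A 0).getD 0, [])   -- A[0]; none (IndexError on []) lies outside Pre_
  else
    let m := A.length / 2                  -- len(A)//2 on the Nat length = Python floor division
    let left := largest_compared (A.take m)    -- A[:m] (= PySem.List.slice_to_natCast)
    let right := largest_compared (A.drop m)   -- A[m:] (= PySem.List.slice_from_natCast)
    if left.1 > right.1 then (left.1, left.2 ++ [right.1])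
    else (right.1, right.2 ++ [left.1])
termination_by A.length
decreasing_by
  · exact lt_of_le_of_lt (List.length_take_le _ _) (Nat.div_lt_self (by omega) one_lt_two)
  · rw [List.length_drop]
    exact Nat.sub_lt (by omega) (Nat.div_pos (by omega) two_pos)

-- ===== PORT B =====
-- max(A[lo:hi])
def pvMaxSlice (A : List Int) (lo hi : Nat) : Int :=
  (PySem.List.max? (PySem.List.slice A (some (lo : Int)) (some (hi : Int))) (fun x => x)).getD 0

-- the while loop of Source B: descend the index range [lo, hi) towards the winner index w
def lcDescend (A : List Int) (w : Nat) (lo hi : Nat) (comps : List Int) : List Int :=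
  if 2 ≤ hi - lo then
    let m := lo + (hi - lo) / 2
    if m ≤ w then lcDescend A w m hi (comps ++ [pvMaxSlice A lo m])
    else lcDescend A w lo m (comps ++ [pvMaxSlice A m hi])
  else comps
termination_by hi - lo
decreasing_by
  · exact Nat.sub_lt_sub_left (by omega) (Nat.lt_add_of_pos_right (Nat.div_pos (by omega) two_pos))
  · rw [Nat.add_sub_cancel_left]
    exact Nat.div_lt_self (by omega) one_lt_two

def largest_compared_alt (A : List Int) : Int × List Int :=
  if A.length < 2 then
    ((PySem.List.pyGet? A 0).getD 0, [])   -- A[0]; none (IndexError on []) lies outside Pre_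
  else
    let mx := (PySem.List.max? A (fun x => x)).getD 0            -- max(A) (nonempty here)
    -- w = len(A) - 1 - A[::-1].index(mx)  (A[::-1] = A.reverse, cf. slice?_none_none_neg_one);
    -- mx ∈ A so index? is some, and the Nat subtraction never truncates (index < len)
    let w := A.length - 1 - (PySem.List.index? A.reverse mx).getD 0
    (mx, (lcDescend A w 0 A.length []).reverse)

-- ===== PRECONDITION & SPEC =====
-- A raises IndexError on the empty list (A[0] fails); excluded, both ports return a dummy there.
def Pre_largest_compared (A : List Int) : Prop := A ≠ []
instance (A : List Int) : Decidable (Pre_largest_compared A) := by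
  unfold Pre_largest_compared; infer_instance

def pvWitness_largest_compared : List Int := [3, 1, 2]

def Spec_largest_compared (A : List Int) (out : Int × List Int) : Prop := out = largest_compared_alt A
instance (A : List Int) (out : Int × List Int) : Decidable (Spec_largest_compared A out) := by
  unfold Spec_largest_compared; infer_instance

-- ===== CLAIM (what is proved, stated in full; the proofs are below) =====
def Claim_equal_largest_compared : Prop := ∀ (A : List Int), Dom_largest_compared A → Pre_largest_compared A → Spec_largest_compared A (largest_compared A)


-- ===== LEMMAS AND PROOFS =====

-- max(xs) as B computes it, for proofs
def pvM (xs : List Int) : Int := (PySem.List.max? xs (fun x => x)).getD 0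

theorem pvM_spec (xs : List Int) (h : xs ≠ []) : pvM xs ∈ xs ∧ ∀ y ∈ xs, y ≤ pvM xs := by
  cases hm : PySem.List.max? xs (fun x => x) with
  | none => exact absurd ((PySem.List.max?_eq_none_iff xs (fun x => x)).mp hm) h
  | some m =>
    have h1 := PySem.List.max?_mem hm
    have h2 := PySem.List.max?_isMax hm
    simp only [pvM, hm, Option.getD_some]
    exact ⟨h1, h2⟩

theorem pvM_eq (xs : List Int) (x : Int) (hmem : x ∈ xs) (hub : ∀ y ∈ xs, y ≤ x) :
    pvM xs = x := by
  have h := pvM_spec xs (List.ne_nil_of_mem hmem)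
  exact le_antisymm (hub _ h.1) (h.2 x hmem)

theorem pvMaxSlice_eq (A : List Int) (lo hi : Nat) :
    pvMaxSlice A lo hi = pvM (PySem.List.slice A (some (lo : Int)) (some (hi : Int))) := rfl

-- one unfolding of A's recursive case
theorem largest_compared_step (A : List Int) (h : ¬ A.length < 2) :
    largest_compared A =
      (if (largest_compared (A.take (A.length / 2))).1 > (largest_compared (A.drop (A.length / 2))).1
       then ((largest_compared (A.take (A.length / 2))).1,
             (largest_compared (A.take (A.length / 2))).2 ++ [(largest_compared (A.drop (A.length / 2))).1])
       else ((largest_compared (A.drop (A.length / 2))).1,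
             (largest_compared (A.drop (A.length / 2))).2 ++ [(largest_compared (A.take (A.length / 2))).1])) := by
  rw [largest_compared]
  simp [h]

theorem slice_ne_nil (A : List Int) (lo hi : Nat) (h1 : lo < hi) (h2 : hi ≤ A.length) :
    PySem.List.slice A (some (lo : Int)) (some (hi : Int)) ≠ [] := by
  rw [PySem.List.slice_natCast]
  rw [← List.length_pos_iff]
  simp
  omega

theorem length_slice_nat (A : List Int) (lo hi : Nat) (h2 : hi ≤ A.length) (h1 : lo ≤ hi) :
    (PySem.List.slice A (some (lo : Int)) (some (hi : Int))).length = hi - lo := by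
  rw [PySem.List.slice_natCast]
  simp
  omega

theorem mx_mem_slice (A : List Int) (mx : Int) (w : Nat) (hwlt : w < A.length)
    (hwv : A[w]'hwlt = mx) (lo hi : Nat) (hlo : lo ≤ w) (hw : w < hi) (_hhi : hi ≤ A.length) :
    mx ∈ PySem.List.slice A (some (lo : Int)) (some (hi : Int)) := by
  rw [PySem.List.slice_natCast]
  have hlen : w - lo < (List.take (hi - lo) (List.drop lo A)).length := by
    simp; omega
  have : (List.take (hi - lo) (List.drop lo A))[w - lo]'hlen = mx := by
    rw [List.getElem_take, List.getElem_drop]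
    have : lo + (w - lo) = w := by omega
    simp_rw [this]
    exact hwv
  rw [← this]
  exact List.getElem_mem hlen

theorem slice_all_lt (A : List Int) (mx : Int) (w : Nat)
    (hlast : ∀ j, ∀ hj : j < A.length, w < j → A[j]'hj < mx)
    (m hi : Nat) (hm : w < m) (_hhi : hi ≤ A.length) :
    ∀ x ∈ PySem.List.slice A (some (m : Int)) (some (hi : Int)), x < mx := by
  rw [PySem.List.slice_natCast]
  intro x hx
  obtain ⟨i, hi', hxe⟩ := List.mem_iff_getElem.mp hx
  rw [List.getElem_take, List.getElem_drop] at hxe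
  subst hxe
  apply hlast
  omega

theorem pvM_slice_eq_mx (A : List Int) (mx : Int) (w : Nat) (hub : ∀ y ∈ A, y ≤ mx)
    (hwlt : w < A.length) (hwv : A[w]'hwlt = mx) (lo hi : Nat)
    (hlo : lo ≤ w) (hw : w < hi) (hhi : hi ≤ A.length) :
    pvM (PySem.List.slice A (some (lo : Int)) (some (hi : Int))) = mx := by
  apply pvM_eq
  · exact mx_mem_slice A mx w hwlt hwv lo hi hlo hw hhi
  · intro y hy
    exact hub y (PySem.List.mem_of_mem_slice A _ _ hy)

theorem pvM_slice_le (A : List Int) (mx : Int) (hub : ∀ y ∈ A, y ≤ mx) (lo hi : Nat)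
    (h1 : lo < hi) (h2 : hi ≤ A.length) :
    pvM (PySem.List.slice A (some (lo : Int)) (some (hi : Int))) ≤ mx := by
  have hne := slice_ne_nil A lo hi h1 h2
  exact hub _ (PySem.List.mem_of_mem_slice A _ _ ((pvM_spec _ hne).1))

-- splitting a slice at its midpoint = taking / dropping inside the slice
theorem slice_take (A : List Int) (lo m hi : Nat) (h1 : lo ≤ m) (h2 : m ≤ hi) :
    (PySem.List.slice A (some (lo : Int)) (some (hi : Int))).take (m - lo) =
      PySem.List.slice A (some (lo : Int)) (some (m : Int)) := by
  rw [PySem.List.slice_natCast, PySem.List.slice_natCast, List.take_take]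
  have : min (m - lo) (hi - lo) = m - lo := by omega
  rw [this]

theorem slice_drop (A : List Int) (lo m hi : Nat) (h1 : lo ≤ m) :
    (PySem.List.slice A (some (lo : Int)) (some (hi : Int))).drop (m - lo) =
      PySem.List.slice A (some (m : Int)) (some (hi : Int)) := by
  rw [PySem.List.slice_natCast, PySem.List.slice_natCast, List.drop_take, List.drop_drop]
  have e1 : hi - lo - (m - lo) = hi - m := by omega
  have e2 : lo + (m - lo) = m := by omega
  rw [e1, e2]

theorem fst_eq_pvM : ∀ (A : List Int), A ≠ [] → (largest_compared A).1 = pvM A := by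
  intro A hne
  induction hn : A.length using Nat.strong_induction_on generalizing A with
  | _ n ih =>
  subst hn
  by_cases h : A.length < 2
  · match A, hne, h with
    | [x], _, _ =>
      simp [largest_compared, pvM, PySem.List.pyGet?, PySem.List.pyIdx?, PySem.List.max?]
  · rw [largest_compared_step A h]
    have hm1 : 1 ≤ A.length / 2 := by omega
    have hmlt : A.length / 2 < A.length := by omega
    have htne : A.take (A.length / 2) ≠ [] := by
      rw [← List.length_pos_iff]; simp; omega
    have hdne : A.drop (A.length / 2) ≠ [] := by
      rw [← List.length_pos_iff]; simp; omega
    have ihl := ih _ (by simp; omega) _ htne rfl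
    have ihr := ih _ (by simp; omega) _ hdne rfl
    have hmemt := pvM_spec _ htne
    have hmemd := pvM_spec _ hdne
    have hcover : ∀ y ∈ A, y ∈ A.take (A.length / 2) ∨ y ∈ A.drop (A.length / 2) := by
      intro y hy
      rw [← List.take_append_drop (A.length / 2) A] at hy
      exact List.mem_append.mp hy
    by_cases hgt : (largest_compared (A.take (A.length / 2))).1 > (largest_compared (A.drop (A.length / 2))).1
    · rw [if_pos hgt]
      simp only
      rw [ihl]
      apply (pvM_eq A _ (List.take_subset _ _ hmemt.1) ?_).symm
      intro y hy
      rcases hcover y hy with h' | h'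
      · exact hmemt.2 y h'
      · have := hmemd.2 y h'
        rw [ihl, ihr] at hgt
        omega
    · rw [if_neg hgt]
      simp only
      rw [ihr]
      apply (pvM_eq A _ (List.drop_subset _ _ hmemd.1) ?_).symm
      intro y hy
      rcases hcover y hy with h' | h'
      · have := hmemt.2 y h'
        rw [ihl, ihr] at hgt
        omega
      · exact hmemd.2 y h'

theorem lcDescend_step (A : List Int) (w lo hi : Nat) (comps : List Int) (hbig : 2 ≤ hi - lo) :
    lcDescend A w lo hi comps =
      (if lo + (hi - lo) / 2 ≤ w
       then lcDescend A w (lo + (hi - lo) / 2) hi (comps ++ [pvMaxSlice A lo (lo + (hi - lo) / 2)])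
       else lcDescend A w lo (lo + (hi - lo) / 2) (comps ++ [pvMaxSlice A (lo + (hi - lo) / 2) hi])) := by
  rw [lcDescend]
  simp [hbig]

theorem descend_eq (A : List Int) (mx : Int) (w : Nat)
    (hub : ∀ y ∈ A, y ≤ mx) (hwlt : w < A.length) (hwv : A[w]'hwlt = mx)
    (hlast : ∀ j, ∀ hj : j < A.length, w < j → A[j]'hj < mx) :
    ∀ k lo hi comps, hi - lo = k → lo ≤ w → w < hi → hi ≤ A.length →
      lcDescend A w lo hi comps =
        comps ++ ((largest_compared (PySem.List.slice A (some (lo : Int)) (some (hi : Int)))).2).reverse := by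
  intro k
  induction k using Nat.strong_induction_on with
  | _ k ih =>
  intro lo hi comps hk hlo hwhi hhin
  by_cases hbig : 2 ≤ hi - lo
  · rw [lcDescend_step A w lo hi comps hbig]
    set m := lo + (hi - lo) / 2 with hmdef
    have hlom : lo < m := by omega
    have hmhi : m < hi := by omega
    set S := PySem.List.slice A (some (lo : Int)) (some (hi : Int)) with hSdef
    have hSlen : S.length = hi - lo := length_slice_nat A lo hi hhin (by omega)
    have hSm : S.length / 2 = m - lo := by omega
    have hS2 : ¬ S.length < 2 := by omega
    have htake : S.take (S.length / 2) = PySem.List.slice A (some (lo : Int)) (some (m : Int)) := by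
      rw [hSm]; exact slice_take A lo m hi (by omega) (by omega)
    have hdrop : S.drop (S.length / 2) = PySem.List.slice A (some (m : Int)) (some (hi : Int)) := by
      rw [hSm]; exact slice_drop A lo m hi (by omega)
    rw [largest_compared_step S hS2, htake, hdrop]
    have hlfst : (largest_compared (PySem.List.slice A (some (lo : Int)) (some (m : Int)))).1 =
        pvM (PySem.List.slice A (some (lo : Int)) (some (m : Int))) :=
      fst_eq_pvM _ (slice_ne_nil A lo m hlom (by omega))
    have hrfst : (largest_compared (PySem.List.slice A (some (m : Int)) (some (hi : Int)))).1 =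
        pvM (PySem.List.slice A (some (m : Int)) (some (hi : Int))) :=
      fst_eq_pvM _ (slice_ne_nil A m hi hmhi hhin)
    by_cases hmw : m ≤ w
    · -- winner in the right half: right wins (ties go right)
      rw [if_pos hmw]
      have hrmx : pvM (PySem.List.slice A (some (m : Int)) (some (hi : Int))) = mx :=
        pvM_slice_eq_mx A mx w hub hwlt hwv m hi hmw hwhi hhin
      have hle : pvM (PySem.List.slice A (some (lo : Int)) (some (m : Int))) ≤ mx :=
        pvM_slice_le A mx hub lo m hlom (by omega)
      rw [if_neg (by rw [hlfst, hrfst, hrmx]; omega)]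
      rw [ih (hi - m) (by omega) m hi _ rfl hmw hwhi hhin]
      simp [pvMaxSlice_eq, hlfst]
    · -- winner in the left half: left wins strictly
      rw [if_neg hmw]
      have hlmx : pvM (PySem.List.slice A (some (lo : Int)) (some (m : Int))) = mx :=
        pvM_slice_eq_mx A mx w hub hwlt hwv lo m hlo (by omega) (by omega)
      have hrlt : pvM (PySem.List.slice A (some (m : Int)) (some (hi : Int))) < mx := by
        have hne := slice_ne_nil A m hi hmhi hhin
        exact slice_all_lt A mx w hlast m hi (by omega) hhin _ (pvM_spec _ hne).1
      rw [if_pos (by rw [hlfst, hrfst, hlmx]; omega)]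
      rw [ih (m - lo) (by omega) lo m _ rfl hlo (by omega) (by omega)]
      simp [pvMaxSlice_eq, hrfst]
  · rw [lcDescend]
    rw [if_neg hbig]
    have hlen : (PySem.List.slice A (some (lo : Int)) (some (hi : Int))).length = hi - lo :=
      length_slice_nat A lo hi hhin (by omega)
    have : (largest_compared (PySem.List.slice A (some (lo : Int)) (some (hi : Int)))).2 = [] := by
      rw [largest_compared, dif_pos (by omega)]
    rw [this]
    simp

-- ===== VERDICT (by name: the statement is the Claim_ definition above) =====
theorem largest_compared_spec : Claim_equal_largest_compared := by
  intro A _hdom hpre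
  unfold Spec_largest_compared
  by_cases h : A.length < 2
  · match A, hpre, h with
    | [x], _, _ =>
      rw [largest_compared, largest_compared_alt]
      norm_num
  · rw [largest_compared_alt, if_neg h]
    have hspec := pvM_spec A hpre
    have hrev : pvM A ∈ A.reverse := by simpa using hspec.1
    obtain ⟨kk, hksome⟩ : ∃ kk, PySem.List.index? A.reverse (pvM A) = some kk := by
      cases hc : PySem.List.index? A.reverse (pvM A) with
      | none =>
        exact absurd hrev ((PySem.List.index?_eq_none_iff _ _).mp hc)
      | some kk => exact ⟨kk, rfl⟩
    obtain ⟨hk, hkv, hkfirst⟩ := PySem.List.getElem_of_index?_eq_some hksome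
    have hkn : kk < A.length := by simpa using hk
    simp only [pvM] at *
    simp only [hksome, Option.getD_some]
    set mx := (PySem.List.max? A (fun x => x)).getD 0 with hmx
    set w := A.length - 1 - kk with hwdef
    have hwlt : w < A.length := by omega
    have hwv : A[w]'hwlt = mx := by
      rw [List.getElem_reverse] at hkv
      simpa using hkv
    have hlast : ∀ j, ∀ hj : j < A.length, w < j → A[j]'hj < mx := by
      intro j hj hwj
      have hne : A[j]'hj ≠ mx := by
        have hidx : A.length - 1 - j < kk := by omega
        have := hkfirst (A.length - 1 - j) (by simpa using hidx)
        rw [List.getElem_reverse] at this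
        have hjj : A.length - 1 - (A.length - 1 - j) = j := by omega
        simp only [hjj] at this
        exact this
      exact lt_of_le_of_ne (hspec.2 _ (List.getElem_mem hj)) hne
    have hdesc := descend_eq A mx w hspec.2 hwlt hwv hlast (A.length - 0) 0 A.length []
      rfl (by omega) hwlt le_rfl
    have hslA : PySem.List.slice A (some ((0 : Nat) : Int)) (some ((A.length : Nat) : Int)) = A := by
      rw [PySem.List.slice_natCast]
      rw [Nat.sub_zero, List.drop_zero, List.take_length]
    rw [hslA] at hdesc
    rw [hdesc]
    simp only [List.nil_append, List.reverse_reverse]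
    have hfst' : (largest_compared A).1 = mx := by
      rw [fst_eq_pvM A hpre, pvM, ← hmx]
    rw [← hfst']
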